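-- pv_equiv track=rewrite | github.com/qformat/indextts2-Multi-launcher | src/core/ai_chunk_pipeline.py | build_role_continuity_map
-- ===== SOURCE A (Python) =====
-- def build_role_continuity_map(assignments):
--     continuity = {}
--     for a in assignments:
--         if not isinstance(a, dict):
--             continue
--         role = a.get("role", "旁白")
--         line = int(a.get("line", 0))
--         continuity.setdefault(role, []).append(line)
--     merged = {}
--     for role, lines in continuity.items():
--         if not lines:
--             continue
--         lines = sorted(set(lines))
--         ranges = []
--         s = lines[0]
--         e = lines[0]
--         for x in lines[1:]:
--             if x == e + 1:
--                 e = x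
--             else:
--                 ranges.append((s, e))
--                 s = x
--                 e = x
--         ranges.append((s, e))
--         merged[role] = ranges
--     return merged
-- ===== SOURCE B (Python) =====
-- def build_role_continuity_map(assignments):
--     groups = {}
--     for a in assignments:
--         if not isinstance(a, dict):
--             continue
--         groups.setdefault(a.get("role", "旁白"), set()).add(int(a.get("line", 0)))
--     merged = {}
--     for role, s in groups.items():
--         starts = sorted(x for x in s if x - 1 not in s)
--         ends = sorted(x for x in s if x + 1 not in s)
--         merged[role] = list(zip(starts, ends))
--     return merged
-- ===== Notes on version B (the rewrite author's own statement) =====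
-- stated objective: alternative
-- what changed: The merge phase is replaced: instead of scanning each sorted unique line list with running (s, e) state, B collects lines into per-role sets and reads each range directly off the set - run starts are members x with x-1 absent, run ends are members x with x+1 absent - sorted and zipped; the grouping lookups (role default, int() coercion) are unchanged.
import Mathlib
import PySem

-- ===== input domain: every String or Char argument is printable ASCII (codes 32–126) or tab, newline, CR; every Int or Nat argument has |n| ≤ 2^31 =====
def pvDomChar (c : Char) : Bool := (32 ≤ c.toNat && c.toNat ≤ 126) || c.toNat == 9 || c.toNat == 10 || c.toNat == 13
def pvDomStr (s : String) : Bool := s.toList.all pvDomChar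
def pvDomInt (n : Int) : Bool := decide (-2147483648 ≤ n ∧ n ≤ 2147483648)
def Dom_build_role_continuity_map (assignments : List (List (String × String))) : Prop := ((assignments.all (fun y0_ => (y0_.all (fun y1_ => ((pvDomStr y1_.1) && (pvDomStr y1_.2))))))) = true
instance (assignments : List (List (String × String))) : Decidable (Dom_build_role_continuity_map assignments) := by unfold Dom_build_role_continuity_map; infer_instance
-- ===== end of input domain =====

-- B replaces A's running (s,e) scan over each sorted unique line list by reading run boundaries
-- straight off the per-role set (starts: x with x-1 absent; ends: x with x+1 absent), sorted and zipped;
-- an alternative of the same cost, not claimed faster.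

-- ===== PORT A =====
-- a.get("role", "旁白")
def pvRoleOf (a : List (String × String)) : String := (PySem.Dict.mk a).getD "role" "旁白"
-- int(a.get("line", 0)); Pre_ excludes the inputs where int() raises ValueError (ofStr? = none)
def pvLineOf (a : List (String × String)) : Int :=
  match (PySem.Dict.mk a).get? "line" with
  | some s => (PySem.Int.ofStr? s).getD 0
  | none => 0

-- the body of A's inner 'for x in lines[1:]' loop, state (ranges, s, e)
def pvStep (acc : List (Int × Int) × Int × Int) (x : Int) : List (Int × Int) × Int × Int :=
  if x = acc.2.2 + 1 then (acc.1, acc.2.1, x) else (acc.1 ++ [(acc.2.1, acc.2.2)], x, x)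

-- A's merge of one role's sorted unique line list (lines ≠ [] at every call site: headD's default is unreachable)
def pvMergeRanges (lines : List Int) : List (Int × Int) :=
  let s0 := lines.headD 0
  let st := lines.tail.foldl pvStep (([] : List (Int × Int)), s0, s0)
  st.1 ++ [(st.2.1, st.2.2)]

def build_role_continuity_map (assignments : List (List (String × String))) : List (String × List (Int × Int)) :=
  let continuity : PySem.Dict String (List Int) :=
    assignments.foldl (fun d a => d.modify (pvRoleOf a) [] (fun v => v ++ [pvLineOf a])) PySem.Dict.empty
  let merged : PySem.Dict String (List (Int × Int)) :=
    continuity.items.foldl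
      (fun m p =>
        if p.2 = [] then m
        else m.insert p.1 (pvMergeRanges (PySem.List.sorted (PySem.Set.ofList p.2) (fun x => x))))
      PySem.Dict.empty
  merged.items

-- ===== PORT B =====
-- B's merge of one role's set of lines: zip the sorted run starts with the sorted run ends
def pvRunBounds (s : PySem.Set Int) : List (Int × Int) :=
  let starts := PySem.List.sorted (s.filter (fun x => !(PySem.Set.contains s (x - 1)))) (fun x => x)
  let ends := PySem.List.sorted (s.filter (fun x => !(PySem.Set.contains s (x + 1)))) (fun x => x)
  starts.zip ends

def build_role_continuity_map_alt (assignments : List (List (String × String))) : List (String × List (Int × Int)) :=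
  let groups : PySem.Dict String (PySem.Set Int) :=
    assignments.foldl
      (fun d a => d.modify (pvRoleOf a) PySem.Set.empty (fun s => PySem.Set.add s (pvLineOf a)))
      PySem.Dict.empty
  let merged : PySem.Dict String (List (Int × Int)) :=
    groups.items.foldl (fun m p => m.insert p.1 (pvRunBounds p.2)) PySem.Dict.empty
  merged.items

-- ===== PRECONDITION & SPEC =====
-- Pre_ excludes exactly the inputs on which A raises ValueError: a dict whose "line" value does not parse as int().
def Pre_build_role_continuity_map (assignments : List (List (String × String))) : Prop :=
  (assignments.all (fun a =>
    match (PySem.Dict.mk a).get? "line" with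
    | some s => (PySem.Int.ofStr? s).isSome
    | none => true)) = true
instance (assignments : List (List (String × String))) : Decidable (Pre_build_role_continuity_map assignments) := by unfold Pre_build_role_continuity_map; infer_instance

def pvWitness_build_role_continuity_map : (List (List (String × String))) :=
  [[("role", "hero"), ("line", "3")], [("line", "4")], [("role", "hero"), ("line", " 7 ")]]

def Spec_build_role_continuity_map (assignments : List (List (String × String))) (out : List (String × List (Int × Int))) : Prop := out = build_role_continuity_map_alt assignments
instance (assignments : List (List (String × String))) (out : List (String × List (Int × Int))) : Decidable (Spec_build_role_continuity_map assignments out) := by unfold Spec_build_role_continuity_map; infer_instance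

-- ===== CLAIM (what is proved, stated in full; the proofs are below) =====
def Claim_equal_build_role_continuity_map : Prop := ∀ (assignments : List (List (String × String))), Dom_build_role_continuity_map assignments → Pre_build_role_continuity_map assignments → Spec_build_role_continuity_map assignments (build_role_continuity_map assignments)

-- ===== LEMMAS AND PROOFS =====

-- the (role, line) pair stream and the per-role line list (phase 1 of both programs)
def pvPairs (assignments : List (List (String × String))) : List (String × Int) :=
  assignments.map (fun a => (pvRoleOf a, pvLineOf a))

def pvLinesOf (assignments : List (List (String × String))) (r : String) : List Int :=
  ((pvPairs assignments).filter (fun p => p.1 == r)).map (fun p => p.2)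

-- adjacent pairs of a list that break a consecutive run
def pvAdjs (L : List Int) : List (Int × Int) :=
  (L.zip L.tail).filter (fun p => !(p.2 == p.1 + 1))

theorem pv_scan_eq (t : List Int) : ∀ (rs : List (Int × Int)) (s e : Int),
    (t.foldl pvStep (rs, s, e)).1 ++ [((t.foldl pvStep (rs, s, e)).2.1, (t.foldl pvStep (rs, s, e)).2.2)]
      = rs ++ ((s :: (pvAdjs (e :: t)).map (fun p => p.2)).zip
               ((pvAdjs (e :: t)).map (fun p => p.1) ++ [t.getLastD e])) := by
  induction t with
  | nil => intro rs s e; simp [pvAdjs]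
  | cons x t ih =>
    intro rs s e
    simp only [List.foldl_cons]
    by_cases hx : x = e + 1
    · have h1 : pvStep (rs, s, e) x = (rs, s, x) := by simp [pvStep, hx]
      rw [h1]
      have h2 : pvAdjs (e :: x :: t) = pvAdjs (x :: t) := by
        simp [pvAdjs, hx]
      rw [h2, ih rs s x]
      rw [List.getLastD_cons]
    · have h1 : pvStep (rs, s, e) x = (rs ++ [(s, e)], x, x) := by simp [pvStep, hx]
      rw [h1]
      have h2 : pvAdjs (e :: x :: t) = (e, x) :: pvAdjs (x :: t) := by
        simp [pvAdjs, hx]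
      rw [h2, ih (rs ++ [(s, e)]) x x]
      rw [List.getLastD_cons]
      simp

theorem pv_starts_eq (t : List Int) : ∀ (a : Int), (a :: t).Pairwise (· < ·) →
    (a :: t).filter (fun y => !((a :: t).contains (y - 1)))
      = a :: (pvAdjs (a :: t)).map (fun p => p.2) := by
  induction t with
  | nil =>
    intro a _
    simp [pvAdjs, List.contains_eq_mem]
  | cons b t ih =>
    intro a h
    have hat : ∀ y ∈ b :: t, a < y := (List.pairwise_cons.mp h).1
    have hab : a < b := hat b (by simp)
    have h' : (b :: t).Pairwise (· < ·) := (List.pairwise_cons.mp h).2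
    have hbt : ∀ y ∈ t, b < y := (List.pairwise_cons.mp h').1
    have hPa : ((a :: b :: t).contains (a - 1)) = false := by
      simp only [List.contains_eq_mem, decide_eq_false_iff_not, List.mem_cons, not_or]
      refine ⟨by omega, by omega, fun h1 => absurd (hat _ (List.mem_cons_of_mem b h1)) (by omega)⟩
    have htail : List.filter (fun y => !((a :: b :: t).contains (y - 1))) t
        = List.filter (fun y => !((b :: t).contains (y - 1))) t := by
      apply List.filter_congr
      intro y hy
      have hby : b < y := hbt y hy
      simp only [List.contains_eq_mem]
      congr 1
      rw [decide_eq_decide]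
      simp only [List.mem_cons]
      constructor
      · rintro (h1 | h1 | h1)
        · omega
        · exact Or.inl h1
        · exact Or.inr h1
      · rintro (h1 | h1)
        · exact Or.inr (Or.inl h1)
        · exact Or.inr (Or.inr h1)
    have hPb' : ((b :: t).contains (b - 1)) = false := by
      simp only [List.contains_eq_mem, decide_eq_false_iff_not, List.mem_cons, not_or]
      exact ⟨by omega, fun h1 => absurd (hbt _ h1) (by omega)⟩
    have hIH := ih b h'
    rw [List.filter_cons] at hIH
    rw [hPb'] at hIH
    simp only [Bool.not_false, if_pos] at hIH
    injection hIH with _ hIH'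
    by_cases hba : b = a + 1
    · have hcb : ((a :: b :: t).contains (b - 1)) = true := by
        simp only [List.contains_eq_mem, decide_eq_true_eq, List.mem_cons]
        exact Or.inl (by omega)
      have hadj : pvAdjs (a :: b :: t) = pvAdjs (b :: t) := by simp [pvAdjs, hba]
      simp only [List.filter_cons, hPa, hcb, Bool.not_true, Bool.not_false, if_pos, if_neg,
        Bool.false_eq_true, not_false_eq_true, hadj, htail, hIH']
    · have hcb : ((a :: b :: t).contains (b - 1)) = false := by
        simp only [List.contains_eq_mem, decide_eq_false_iff_not, List.mem_cons, not_or]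
        exact ⟨by omega, by omega, fun h1 => absurd (hbt _ h1) (by omega)⟩
      have hadj : pvAdjs (a :: b :: t) = (a, b) :: pvAdjs (b :: t) := by
        simp [pvAdjs, hba]
      simp only [List.filter_cons, hPa, hcb, Bool.not_false, if_pos, hadj, htail, hIH',
        List.map_cons]

theorem pv_ends_eq (t : List Int) : ∀ (a : Int), (a :: t).Pairwise (· < ·) →
    (a :: t).filter (fun y => !((a :: t).contains (y + 1)))
      = (pvAdjs (a :: t)).map (fun p => p.1) ++ [t.getLastD a] := by
  induction t with
  | nil =>
    intro a _
    simp [pvAdjs, List.contains_eq_mem]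
  | cons b t ih =>
    intro a h
    have hat : ∀ y ∈ b :: t, a < y := (List.pairwise_cons.mp h).1
    have hab : a < b := hat b (by simp)
    have h' : (b :: t).Pairwise (· < ·) := (List.pairwise_cons.mp h).2
    have hbt : ∀ y ∈ t, b < y := (List.pairwise_cons.mp h').1
    have htail : List.filter (fun y => !((a :: b :: t).contains (y + 1))) (b :: t)
        = List.filter (fun y => !((b :: t).contains (y + 1))) (b :: t) := by
      apply List.filter_congr
      intro y hy
      have hby : b ≤ y := by
        rcases List.mem_cons.mp hy with h1 | h1
        · omega
        · exact le_of_lt (hbt y h1)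
      simp only [List.contains_eq_mem]
      congr 1
      rw [decide_eq_decide]
      simp only [List.mem_cons]
      constructor
      · rintro (h1 | h1 | h1)
        · omega
        · exact Or.inl h1
        · exact Or.inr h1
      · rintro (h1 | h1)
        · exact Or.inr (Or.inl h1)
        · exact Or.inr (Or.inr h1)
    have hIH := ih b h'
    by_cases hba : b = a + 1
    · have hca : ((a :: b :: t).contains (a + 1)) = true := by
        simp only [List.contains_eq_mem, decide_eq_true_eq, List.mem_cons]
        exact Or.inr (Or.inl (by omega))
      have hadj : pvAdjs (a :: b :: t) = pvAdjs (b :: t) := by simp [pvAdjs, hba]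
      rw [List.filter_cons]
      rw [hca]
      simp only [Bool.not_true, if_neg (by simp : ¬((false : Bool) = true))]
      rw [htail, hIH, hadj, List.getLastD_cons]
    · have hca : ((a :: b :: t).contains (a + 1)) = false := by
        simp only [List.contains_eq_mem, decide_eq_false_iff_not, List.mem_cons, not_or]
        refine ⟨by omega, by omega, fun h1 => absurd (hbt _ h1) (by omega)⟩
      have hadj : pvAdjs (a :: b :: t) = (a, b) :: pvAdjs (b :: t) := by
        simp [pvAdjs, hba]
      rw [List.filter_cons]
      rw [hca]
      simp only [Bool.not_false, if_pos]
      rw [htail, hIH, hadj, List.getLastD_cons]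
      simp

theorem pv_sorted_pairwise_lt (S : List Int) (h : S.Nodup) :
    (PySem.List.sorted S (fun x => x)).Pairwise (· < ·) := by
  have h1 := PySem.List.sorted_pairwise S (fun x => x)
  have h2 : (PySem.List.sorted S (fun x => x)).Nodup :=
    ((PySem.List.sorted_perm S (fun x => x) false).nodup_iff).mpr h
  exact (h1.and h2).imp (fun hp => lt_of_le_of_ne hp.1 hp.2)

theorem pv_sorted_filter (S : List Int) (h : S.Nodup) (p : Int → Bool) :
    PySem.List.sorted (S.filter p) (fun x => x)
      = (PySem.List.sorted S (fun x => x)).filter p := by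
  apply PySem.List.sorted_eq_of_perm_of_pairwise_lt
  · exact (PySem.List.sorted_perm S (fun x => x) false).filter p
  · exact List.Pairwise.sublist (List.filter_sublist) (pv_sorted_pairwise_lt S h)

-- the heart of the equivalence: A's running scan over the sorted set = B's zipped run boundaries
theorem pv_core (S : List Int) (hnd : S.Nodup) (hne : S ≠ []) :
    pvMergeRanges (PySem.List.sorted S (fun x => x)) = pvRunBounds S := by
  have hLperm := PySem.List.sorted_perm S (fun x => x) false
  have hmem : ∀ z : Int, z ∈ PySem.List.sorted S (fun x => x) ↔ z ∈ S := fun z => hLperm.mem_iff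
  have hLlt := pv_sorted_pairwise_lt S hnd
  have hLne : PySem.List.sorted S (fun x => x) ≠ [] := by
    intro h0
    exact hne ((PySem.List.sorted_eq_nil_iff S (fun x => x) false).mp h0)
  obtain ⟨l0, lt, hL⟩ := List.exists_cons_of_ne_nil hLne
  have hcongr : ∀ (d : Int), (PySem.List.sorted S (fun x => x)).filter (fun y => !(PySem.Set.contains S (y + d)))
      = (PySem.List.sorted S (fun x => x)).filter (fun y => !((PySem.List.sorted S (fun x => x)).contains (y + d))) := by
    intro d
    apply List.filter_congr
    intro y _
    show (!(List.contains S (y + d))) = _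
    simp only [List.contains_eq_mem]
    congr 1
    rw [decide_eq_decide]
    exact (hmem (y + d)).symm
  have hstarts : PySem.List.sorted (S.filter (fun x => !(PySem.Set.contains S (x - 1)))) (fun x => x)
      = l0 :: (pvAdjs (l0 :: lt)).map (fun p => p.2) := by
    rw [pv_sorted_filter S hnd]
    have := hcongr (-1)
    simp only [show ∀ y : Int, y + (-1) = y - 1 from fun y => by ring] at this
    rw [this, hL]
    exact pv_starts_eq lt l0 (hL ▸ hLlt)
  have hends : PySem.List.sorted (S.filter (fun x => !(PySem.Set.contains S (x + 1)))) (fun x => x)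
      = (pvAdjs (l0 :: lt)).map (fun p => p.1) ++ [lt.getLastD l0] := by
    rw [pv_sorted_filter S hnd]
    rw [hcongr 1, hL]
    exact pv_ends_eq lt l0 (hL ▸ hLlt)
  simp only [pvRunBounds, pvMergeRanges]
  rw [hstarts, hends, hL]
  simp only [List.headD_cons, List.tail_cons]
  rw [pv_scan_eq lt [] l0 l0]
  simp

theorem pv_getD_foldl_modify_gen {κ β ν : Type} [BEq κ] [LawfulBEq κ] [DecidableEq κ]
    (l : List (κ × β)) : ∀ (d : PySem.Dict κ ν) (d0 : ν) (g : ν → β → ν) (c : κ),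
    (l.foldl (fun d p => d.modify p.1 d0 (fun v => g v p.2)) d).getD c d0
      = ((l.filter (fun p => p.1 == c)).map (fun p => p.2)).foldl g (d.getD c d0) := by
  induction l with
  | nil => intro d d0 g c; simp
  | cons p l ih =>
    intro d d0 g c
    simp only [List.foldl_cons, List.filter_cons]
    by_cases hc : p.1 = c
    · simp only [hc, beq_self_eq_true, if_pos, List.map_cons, List.foldl_cons]
      rw [ih, PySem.Dict.getD_modify, if_pos rfl]
    · have hb : (p.1 == c) = false := beq_eq_false_iff_ne.mpr hc
      simp only [hb, Bool.false_eq_true, if_neg, not_false_eq_true]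
      rw [ih, PySem.Dict.getD_modify, if_neg (fun h => hc h.symm)]

theorem pv_mk_map_getD {κ ν : Type} [BEq κ] [LawfulBEq κ] (l : List (κ × ν)) (dflt : ν)
    (h : (l.map (fun p => p.1)).Nodup) :
    l.map (fun p => (p.1, (PySem.Dict.mk l).getD p.1 dflt)) = l := by
  induction l with
  | nil => simp
  | cons q t ih =>
    simp only [List.map_cons, List.nodup_cons, List.mem_map] at h
    have hq : (PySem.Dict.mk (q :: t)).getD q.1 dflt = q.2 := by
      show ((PySem.Dict.mk (q :: t)).get? q.1).getD dflt = q.2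
      rw [show PySem.Dict.mk (q :: t) = PySem.Dict.mk ((q.1, q.2) :: t) from rfl]
      rw [PySem.Dict.get?_mk_cons]
      simp
    have htl : ∀ p ∈ t, (PySem.Dict.mk (q :: t)).getD p.1 dflt = (PySem.Dict.mk t).getD p.1 dflt := by
      intro p hp
      have hne : (q.1 == p.1) = false :=
        beq_eq_false_iff_ne.mpr (fun he => h.1 ⟨p, hp, he.symm⟩)
      show ((PySem.Dict.mk (q :: t)).get? p.1).getD dflt = _
      rw [show PySem.Dict.mk (q :: t) = PySem.Dict.mk ((q.1, q.2) :: t) from rfl]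
      rw [PySem.Dict.get?_mk_cons]
      simp [hne]
      rfl
    simp only [List.map_cons, hq]
    rw [List.map_congr_left (fun p hp => by rw [htl p hp])]
    rw [ih h.2]

theorem pv_items_getD_map {κ ν : Type} [BEq κ] [LawfulBEq κ] (d : PySem.Dict κ ν) (dflt : ν)
    (h : d.keys.Nodup) :
    d.items = d.keys.map (fun k => (k, d.getD k dflt)) := by
  have hk : d.keys = d.items.map (fun p => p.1) := rfl
  rw [hk, List.map_map]
  have hd : d = PySem.Dict.mk d.items := rfl
  calc d.items = d.items.map (fun p => (p.1, d.getD p.1 dflt)) := by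
        conv_rhs => rw [hd]
        rw [pv_mk_map_getD d.items dflt (hk ▸ h)]
    _ = d.items.map ((fun k => (k, d.getD k dflt)) ∘ (fun p => p.1)) := rfl

theorem pv_items_foldl_insert_keys {κ μ : Type} [BEq κ] [LawfulBEq κ] (K : List κ) (F : κ → μ) :
    ∀ (d : PySem.Dict κ μ), (∀ k ∈ K, d.contains k = false) → K.Nodup →
    ((K.foldl (fun m k => m.insert k (F k)) d)).items = d.items ++ K.map (fun k => (k, F k)) := by
  induction K with
  | nil => intro d _ _; simp
  | cons k K ih =>
    intro d hd hnd
    simp only [List.foldl_cons, List.map_cons]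
    have hk : d.contains k = false := hd k (by simp)
    have hins : (d.insert k (F k)).items = d.items ++ [(k, F k)] := by
      rw [PySem.Dict.items_insert, if_neg (by simp [hk])]
    have hd' : ∀ k' ∈ K, (d.insert k (F k)).contains k' = false := by
      intro k' hk'
      rw [PySem.Dict.contains_insert]
      have : (k' == k) = false :=
        beq_eq_false_iff_ne.mpr (fun he => (List.nodup_cons.mp hnd).1 (he ▸ hk'))
      simp [this, hd k' (List.mem_cons_of_mem k hk')]
    rw [ih (d.insert k (F k)) hd' (List.nodup_cons.mp hnd).2, hins]
    simp

theorem pv_lines_ne_nil (assignments : List (List (String × String))) (r : String)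
    (h : r ∈ assignments.map pvRoleOf) : pvLinesOf assignments r ≠ [] := by
  obtain ⟨a, ha, rfl⟩ := List.mem_map.mp h
  have hmem : (pvRoleOf a, pvLineOf a) ∈ (pvPairs assignments).filter (fun p => p.1 == pvRoleOf a) := by
    rw [List.mem_filter]
    exact ⟨List.mem_map_of_mem ha, by simp⟩
  intro h0
  rw [pvLinesOf] at h0
  rw [List.map_eq_nil_iff] at h0
  rw [h0] at hmem
  exact absurd hmem (List.not_mem_nil)

-- per-role content of A's phase-1 dict
theorem pv_dictA_getD (assignments : List (List (String × String))) (r : String) :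
    (assignments.foldl (fun d a => d.modify (pvRoleOf a) [] (fun v => v ++ [pvLineOf a]))
      PySem.Dict.empty).getD r [] = pvLinesOf assignments r := by
  have h1 : assignments.foldl (fun d a => d.modify (pvRoleOf a) [] (fun v => v ++ [pvLineOf a]))
      PySem.Dict.empty
      = (pvPairs assignments).foldl (fun d p => d.modify p.1 [] (fun v => v ++ [p.2]))
        PySem.Dict.empty := by
    rw [pvPairs, List.foldl_map]
  rw [h1, PySem.Dict.getD_foldl_modify_append]
  rfl

-- per-role content of B's phase-1 dict
theorem pv_dictB_getD (assignments : List (List (String × String))) (r : String) :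
    (assignments.foldl (fun d a => d.modify (pvRoleOf a) PySem.Set.empty
        (fun s => PySem.Set.add s (pvLineOf a))) PySem.Dict.empty).getD r PySem.Set.empty
      = PySem.Set.ofList (pvLinesOf assignments r) := by
  have h1 : assignments.foldl (fun d a => d.modify (pvRoleOf a) PySem.Set.empty
        (fun s => PySem.Set.add s (pvLineOf a))) PySem.Dict.empty
      = (pvPairs assignments).foldl (fun d p => d.modify p.1 PySem.Set.empty
          (fun s => PySem.Set.add s p.2)) PySem.Dict.empty := by
    rw [pvPairs, List.foldl_map]
  rw [h1, pv_getD_foldl_modify_gen]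
  rw [PySem.Set.ofList_eq_foldl]
  rfl

-- keys of a phase-1 dict: the roles in first-occurrence order
theorem pv_dict_keys {ν : Type} (assignments : List (List (String × String))) (d0 : ν)
    (f : ν → Int → ν) :
    (assignments.foldl (fun d a => d.modify (pvRoleOf a) d0 (fun v => f v (pvLineOf a)))
      PySem.Dict.empty).keys = PySem.Set.ofList (assignments.map pvRoleOf) := by
  rw [PySem.Dict.keys_foldl_modify_key assignments pvRoleOf d0
    (fun d a v => f v (pvLineOf a)) PySem.Dict.empty]
  rw [PySem.Set.ofList_eq_foldl]
  rfl

theorem pv_dict_keys_nodup {ν : Type} (assignments : List (List (String × String))) (d0 : ν)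
    (f : ν → Int → ν) :
    (assignments.foldl (fun d a => d.modify (pvRoleOf a) d0 (fun v => f v (pvLineOf a)))
      PySem.Dict.empty).keys.Nodup :=
  PySem.Dict.nodup_keys_foldl_modify_key assignments pvRoleOf d0
    (fun d a v => f v (pvLineOf a)) PySem.Dict.empty (by simp [PySem.Dict.empty])

-- ===== VERDICT (by name: the statement is the Claim_ definition above) =====
theorem build_role_continuity_map_spec : Claim_equal_build_role_continuity_map := by
  intro assignments _ _
  unfold Spec_build_role_continuity_map
  simp only [build_role_continuity_map, build_role_continuity_map_alt]
  have hKnodup : (PySem.Set.ofList (assignments.map pvRoleOf)).Nodup :=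
    PySem.Set.nodup_ofList _
  -- phase-1 items of both dicts, as maps over the shared role list K
  have hIA : (assignments.foldl (fun d a => d.modify (pvRoleOf a) [] (fun v => v ++ [pvLineOf a]))
      PySem.Dict.empty).items
      = (PySem.Set.ofList (assignments.map pvRoleOf)).map
          (fun r => (r, pvLinesOf assignments r)) := by
    rw [pv_items_getD_map _ ([] : List Int) (pv_dict_keys_nodup assignments [] (fun v x => v ++ [x]))]
    rw [pv_dict_keys assignments ([] : List Int) (fun v x => v ++ [x])]
    exact List.map_congr_left (fun r _ => by rw [pv_dictA_getD])
  have hIB : (assignments.foldl (fun d a => d.modify (pvRoleOf a) PySem.Set.empty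
      (fun s => PySem.Set.add s (pvLineOf a))) PySem.Dict.empty).items
      = (PySem.Set.ofList (assignments.map pvRoleOf)).map
          (fun r => (r, PySem.Set.ofList (pvLinesOf assignments r))) := by
    rw [pv_items_getD_map _ (PySem.Set.empty : PySem.Set Int)
      (pv_dict_keys_nodup assignments PySem.Set.empty (fun s x => PySem.Set.add s x))]
    rw [pv_dict_keys assignments (PySem.Set.empty : PySem.Set Int) (fun s x => PySem.Set.add s x)]
    exact List.map_congr_left (fun r _ => by rw [pv_dictB_getD])
  rw [hIA, hIB]
  -- phase 2: both folds walk K and insert fresh keys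
  rw [List.foldl_map, List.foldl_map]
  have hnonempty : ∀ r ∈ PySem.Set.ofList (assignments.map pvRoleOf),
      pvLinesOf assignments r ≠ [] := by
    intro r hr
    exact pv_lines_ne_nil assignments r ((PySem.Set.mem_ofList _ _).mp hr)
  have hA2 : (PySem.Set.ofList (assignments.map pvRoleOf)).foldl
      (fun (m : PySem.Dict String (List (Int × Int))) r =>
        if pvLinesOf assignments r = [] then m
        else m.insert r (pvMergeRanges (PySem.List.sorted
          (PySem.Set.ofList (pvLinesOf assignments r)) (fun x => x)))) PySem.Dict.empty
      = (PySem.Set.ofList (assignments.map pvRoleOf)).foldl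
        (fun m r => m.insert r (pvMergeRanges (PySem.List.sorted
          (PySem.Set.ofList (pvLinesOf assignments r)) (fun x => x)))) PySem.Dict.empty := by
    apply PySem.List.foldl_congr_mem
    intro m r hr
    rw [if_neg (hnonempty r hr)]
  rw [hA2]
  rw [pv_items_foldl_insert_keys _ _ PySem.Dict.empty (fun k _ => rfl) hKnodup]
  rw [pv_items_foldl_insert_keys _ _ PySem.Dict.empty (fun k _ => rfl) hKnodup]
  apply congrArg
  apply List.map_congr_left
  intro r hr
  have hS := PySem.Set.nodup_ofList (pvLinesOf assignments r)
  have hSne : PySem.Set.ofList (pvLinesOf assignments r) ≠ [] := by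
    obtain ⟨x, tl, hx⟩ := List.exists_cons_of_ne_nil (hnonempty r hr)
    have : x ∈ PySem.Set.ofList (pvLinesOf assignments r) :=
      (PySem.Set.mem_ofList _ _).mpr (by rw [hx]; simp)
    exact List.ne_nil_of_mem this
  rw [pv_core _ hS hSne]
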